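-- pv_equiv track=rewrite | github.com/Biochem-Learning/SmilesMerger | process.py | replace_atoms_with_placeholder
-- ===== SOURCE A (Python) =====
-- def replace_atoms_with_placeholder(smiles):
--     result = ""
--     i = 0
--     while i < len(smiles):
--         if smiles[i] == "[":
--             # Find the closing bracket
--             j = i
--             while j < len(smiles) and smiles[j] != "]":
--                 j += 1
--             if j < len(smiles):
--                 result += "*"
--                 i = j + 1
--             else:
--                 result += smiles[i]
--                 i += 1
--         elif smiles[i].isalpha():
--             # If it's a two-letter element like Cl, Br, etc.
--             if i + 1 < len(smiles) and smiles[i + 1].islower():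
--                 result += "*"
--                 i += 2
--             else:
--                 result += "*"
--                 i += 1
--         else:
--             result += smiles[i]
--             i += 1
--     return result
-- ===== SOURCE B (Python) =====
-- def replace_atoms_with_placeholder(smiles):
--     # Segment the string at '[' via str.find, emit '*' per closed bracket group,
--     # and collapse letters in bracket-free segments with a one-flag pass.
--     def collapse(seg):
--         out = []
--         skip = False
--         for ch in seg:
--             if skip and ch.islower():
--                 skip = False
--                 continue
--             skip = ch.isalpha()
--             out.append('*' if skip else ch)
--         return ''.join(out)
--
--     pieces = []
--     i = 0
--     while True:
--         b = smiles.find('[', i)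
--         if b == -1:
--             pieces.append(collapse(smiles[i:]))
--             return ''.join(pieces)
--         pieces.append(collapse(smiles[i:b]))
--         e = smiles.find(']', b + 1)
--         if e == -1:
--             pieces.append('[' + collapse(smiles[b + 1:]))
--             return ''.join(pieces)
--         pieces.append('*')
--         i = e + 1
-- ===== Notes on version B (the rewrite author's own statement) =====
-- stated objective: faster
-- what changed: Replaces A's single index-driven while-loop (with a nested closing-bracket scan and manual i/j arithmetic) by a segmentation algorithm: str.find splits the string at '[' and locates the matching ']', each closed bracket group becomes one '*', and bracket-free segments are collapsed by a separate one-flag for-loop pass joined at the end.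
import Mathlib
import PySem

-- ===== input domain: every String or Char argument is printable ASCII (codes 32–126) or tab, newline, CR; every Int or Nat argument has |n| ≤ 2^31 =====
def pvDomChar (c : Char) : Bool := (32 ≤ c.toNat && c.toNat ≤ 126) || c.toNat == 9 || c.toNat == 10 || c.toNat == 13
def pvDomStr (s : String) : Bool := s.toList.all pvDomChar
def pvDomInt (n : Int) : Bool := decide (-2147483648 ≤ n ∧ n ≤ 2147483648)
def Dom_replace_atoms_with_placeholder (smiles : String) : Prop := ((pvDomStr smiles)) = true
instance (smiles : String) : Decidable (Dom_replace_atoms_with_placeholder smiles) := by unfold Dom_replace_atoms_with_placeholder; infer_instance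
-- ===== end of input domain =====

-- B replaces A's index-driven scanner by find-based bracket segmentation plus a
-- one-flag collapse pass over bracket-free segments (measurably faster in Python: the scan work moves into str.find/str.join).
-- Python's str.isalpha/islower are ported as Char.isAlpha/Char.isLower, exact on the ASCII domain.

-- ===== PORT A =====
-- A scans character by character; the inner `while` that searches for ']' from
-- position i is the dropWhile over (c :: rest) (c = '[' itself is never ']').
def pvGoA : List Char → List Char
  | [] => []
  | c :: rest =>
    if c = '[' then
      match h2 : (c :: rest).dropWhile (· != ']') with
      | _ :: tl => '*' :: pvGoA tl          -- closing bracket found: i = j + 1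
      | [] => c :: pvGoA rest               -- unclosed: emit '[' literally
    else if c.isAlpha then
      match rest with
      | d :: tl => if d.isLower then '*' :: pvGoA tl else '*' :: pvGoA (d :: tl)
      | [] => ['*']
    else c :: pvGoA rest
termination_by cs => cs.length
decreasing_by
  · have h := List.length_dropWhile_le (· != ']') (c :: rest)
    rw [h2] at h; simp at h ⊢; omega
  · simp
  · simp
  · simp
  · simp

def replace_atoms_with_placeholder (smiles : String) : String :=
  String.mk (pvGoA smiles.toList)

-- ===== PORT B =====
-- collapse: the one-flag for-loop over a bracket-free segment.
def pvCollapse : Bool → List Char → List Char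
  | _, [] => []
  | skip, c :: rest =>
    if skip && c.isLower then pvCollapse false rest
    else (if c.isAlpha then '*' else c) :: pvCollapse c.isAlpha rest

-- outer loop: find '[' (takeWhile/dropWhile split), then find ']' after it.
def pvSub (cs : List Char) : List Char :=
  match h1 : cs.dropWhile (· != '[') with
  | [] => pvCollapse false (cs.takeWhile (· != '['))
  | _ :: tl =>
    match h2 : tl.dropWhile (· != ']') with
    | [] => pvCollapse false (cs.takeWhile (· != '[')) ++ '[' :: pvCollapse false tl
    | _ :: tl2 => pvCollapse false (cs.takeWhile (· != '[')) ++ '*' :: pvSub tl2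
termination_by cs.length
decreasing_by
  have ha := List.length_dropWhile_le (· != '[') cs
  have hb := List.length_dropWhile_le (· != ']') tl
  rw [h1] at ha; rw [h2] at hb; simp at ha hb ⊢; omega

def replace_atoms_with_placeholder_alt (smiles : String) : String :=
  String.mk (pvSub smiles.toList)

-- ===== PRECONDITION & SPEC =====
def Spec_replace_atoms_with_placeholder (smiles : String) (out : String) : Prop := out = replace_atoms_with_placeholder_alt smiles
instance (smiles : String) (out : String) : Decidable (Spec_replace_atoms_with_placeholder smiles out) := by unfold Spec_replace_atoms_with_placeholder; infer_instance

-- ===== CLAIM (what is proved, stated in full; the proofs are below) =====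
def Claim_equal_replace_atoms_with_placeholder : Prop := ∀ (smiles : String), Dom_replace_atoms_with_placeholder smiles → Spec_replace_atoms_with_placeholder smiles (replace_atoms_with_placeholder smiles)

-- ===== LEMMAS AND PROOFS =====

theorem pvGoA_unclosed (rest : List Char) (h : ('[' :: rest).dropWhile (· != ']') = []) :
    pvGoA ('[' :: rest) = '[' :: pvGoA rest := by
  rw [pvGoA.eq_def]
  split
  · next heq => exact absurd heq (by simp)
  · next c' rest' heq =>
    injection heq with hc hr; subst hc; subst hr
    rw [if_pos rfl]
    split
    · next x xs heq2 => rw [h] at heq2; exact absurd heq2 (by simp)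
    · rfl

theorem pvGoA_closed (rest tl : List Char) (y : Char)
    (h : ('[' :: rest).dropWhile (· != ']') = y :: tl) :
    pvGoA ('[' :: rest) = '*' :: pvGoA tl := by
  rw [pvGoA.eq_def]
  split
  · next heq => exact absurd heq (by simp)
  · next c' rest' heq =>
    injection heq with hc hr; subst hc; subst hr
    rw [if_pos rfl]
    split
    · next z zs heq2 => rw [h] at heq2; cases heq2; rfl
    · next heq2 => rw [h] at heq2; exact absurd heq2 (by simp)


theorem dropWhile_head_false {α : Type} (p : α → Bool) (l : List α) (x : α) (xs : List α)
    (h : l.dropWhile p = x :: xs) : p x = false := by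
  induction l with
  | nil => simp at h
  | cons c l' ih =>
    by_cases hc : p c
    · rw [List.dropWhile_cons_of_pos hc] at h; exact ih h
    · rw [List.dropWhile_cons_of_neg hc] at h
      cases h; simpa using hc

-- A on seg ++ rest, where seg is '['-free and rest is empty or starts with '[',
-- equals collapse on seg followed by A on rest.
theorem goA_append (seg rest : List Char)
    (hseg : ∀ c ∈ seg, (c != '[') = true)
    (hrest : rest = [] ∨ ∃ tl, rest = '[' :: tl) :
    pvGoA (seg ++ rest) = pvCollapse false seg ++ pvGoA rest := by
  match seg with
  | [] => simp [pvCollapse]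
  | c :: seg' =>
    have hc : c ≠ '[' := by simpa using hseg c (List.mem_cons_self ..)
    by_cases ha : c.isAlpha
    · match seg' with
      | d :: seg'' =>
        have hd : (∀ x ∈ seg'', (x != '[') = true) ∧ (d != '[') = true := by
          constructor
          · intro x hx; exact hseg x (by simp [hx])
          · exact hseg d (by simp)
        by_cases hl : d.isLower
        · have ih := goA_append seg'' rest hd.1 hrest
          simp only [List.cons_append]
          rw [pvGoA.eq_def]
          simp [hc, ha, hl, ih, pvCollapse]
        · have ih := goA_append (d :: seg'') rest (by intro x hx; exact hseg x (by simp at hx ⊢; tauto)) hrest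
          simp only [List.cons_append]
          rw [pvGoA.eq_def]
          simp only [List.cons_append] at ih
          simp [hc, ha, hl, ih, pvCollapse]
      | [] =>
        rcases hrest with h0 | ⟨tl, h0⟩
        · subst h0; rw [pvGoA.eq_def]; simp [hc, ha, pvCollapse, pvGoA]
        · subst h0
          rw [pvGoA.eq_def]
          simp [hc, ha, pvCollapse]
    · have ih := goA_append seg' rest (fun x hx => hseg x (by simp [hx])) hrest
      simp only [List.cons_append]
      rw [pvGoA.eq_def]
      simp [hc, ha, ih, pvCollapse]
termination_by seg.length
decreasing_by all_goals simp

-- On a ']'-free list A never finds a closing bracket, so it acts like collapse.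
theorem goA_no_rbracket (l : List Char)
    (h : ∀ c ∈ l, (c != ']') = true) :
    pvGoA l = pvCollapse false l := by
  match l with
  | [] => rw [pvGoA.eq_def]; rfl
  | c :: l' =>
    have h' : ∀ x ∈ l', (x != ']') = true := fun x hx => h x (by simp [hx])
    by_cases hb : c = '['
    · subst hb
      have hdrop : ('[' :: l').dropWhile (· != ']') = [] :=
        List.dropWhile_eq_nil_iff.mpr h
      have ih := goA_no_rbracket l' h'
      rw [pvGoA_unclosed l' hdrop]
      simp [ih, pvCollapse]
    · by_cases ha : c.isAlpha
      · match l' with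
        | d :: l'' =>
          by_cases hl : d.isLower
          · have ih := goA_no_rbracket l'' (fun x hx => h' x (by simp [hx]))
            rw [pvGoA.eq_def]; simp [hb, ha, hl, ih, pvCollapse]
          · have ih := goA_no_rbracket (d :: l'') h'
            rw [pvGoA.eq_def]; simp [hb, ha, hl, ih, pvCollapse]
        | [] => rw [pvGoA.eq_def]; simp [hb, ha, pvCollapse]
      · have ih := goA_no_rbracket l' h'
        rw [pvGoA.eq_def]; simp [hb, ha, ih, pvCollapse]
termination_by l.length
decreasing_by all_goals simp

theorem goA_eq_sub (cs : List Char) : pvGoA cs = pvSub cs := by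
  have hcs : cs.takeWhile (· != '[') ++ cs.dropWhile (· != '[') = cs :=
    List.takeWhile_append_dropWhile
  have hseg : ∀ c ∈ cs.takeWhile (· != '['), (c != '[') = true :=
    fun c hc => by simpa using List.mem_takeWhile_imp hc
  rw [pvSub.eq_def]
  split
  · next h1 =>
    rw [h1, List.append_nil] at hcs
    conv_lhs => rw [← hcs]
    have := goA_append (cs.takeWhile (· != '[')) [] hseg (Or.inl rfl)
    simpa [pvGoA] using this
  · next b tl h1 =>
    have hb : b = '[' := by
      have := dropWhile_head_false _ _ _ _ h1; simpa using this
    subst hb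
    rw [h1] at hcs
    conv_lhs => rw [← hcs]
    rw [goA_append _ _ hseg (Or.inr ⟨tl, rfl⟩)]
    split
    · next h2 =>
      congr 1
      have hdw : ('[' :: tl).dropWhile (· != ']') = [] := by
        rw [List.dropWhile_cons_of_pos (by decide)]; exact h2
      rw [pvGoA_unclosed tl hdw]
      have htl : ∀ c ∈ tl, (c != ']') = true := List.dropWhile_eq_nil_iff.mp h2
      simp [goA_no_rbracket tl htl]
    · next e tl2 h2 =>
      congr 1
      have hdw : ('[' :: tl).dropWhile (· != ']') = e :: tl2 := by
        rw [List.dropWhile_cons_of_pos (by decide)]; exact h2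
      rw [pvGoA_closed tl tl2 e hdw]
      have ha := List.length_dropWhile_le (· != '[') cs
      have hb2 := List.length_dropWhile_le (· != ']') tl
      rw [h1] at ha; rw [h2] at hb2
      simp only [List.length_cons] at ha hb2
      have hlt : tl2.length < cs.length := by omega
      rw [goA_eq_sub tl2]
termination_by cs.length
decreasing_by omega

-- ===== VERDICT (by name: the statement is the Claim_ definition above) =====
theorem replace_atoms_with_placeholder_spec : Claim_equal_replace_atoms_with_placeholder := by
  intro smiles _
  unfold Spec_replace_atoms_with_placeholder replace_atoms_with_placeholder replace_atoms_with_placeholder_alt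
  rw [goA_eq_sub]
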